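-- pv_equiv track=rewrite | github.com/crooney2016/customer-churn-project | scripts/fix-markdown-lint.py | fix_md036_emphasis_as_heading
-- ===== SOURCE A (Python) =====
-- def fix_md036_emphasis_as_heading(content: str) -> str:
--     """Fix MD036: Convert bold/italic emphasis used as headings to proper headings."""
--     lines = content.split('\n')
--     result = []
--
--     for line in lines:
--         # Check if line starts with ** and ends with ** (likely a heading)
--         stripped = line.strip()
--         if stripped.startswith('**') and stripped.endswith('**') and not stripped.startswith('***'):
--             # Convert to heading (assume h4 for bold standalone lines)
--             text = stripped[2:-2].strip()
--             result.append(f"#### {text}")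
--         elif stripped.startswith('*') and stripped.endswith('*') and not stripped.startswith('**'):
--             # Italic emphasis as heading
--             text = stripped[1:-1].strip()
--             result.append(f"#### {text}")
--         else:
--             result.append(line)
--
--     return '\n'.join(result)
-- ===== SOURCE B (Python) =====
-- import re
--
-- # MD036 fix via anchored regexes: a line is an emphasis-as-heading iff it matches
-- # the bold pattern (**text**) or, failing that, the italic pattern (*text*).
-- _BOLD = re.compile(r'^\s*\*\*(?!\*)(.*?)\*\*\s*$')
-- _ITALIC = re.compile(r'^\s*\*(?!\*)(.*?)\*\s*$')
--
--
-- def _fix_line(line):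
--     m = _BOLD.match(line) or _ITALIC.match(line)
--     return line if m is None else '#### ' + m.group(1).strip()
--
--
-- def fix_md036_emphasis_as_heading(content: str) -> str:
--     return '\n'.join(map(_fix_line, content.split('\n')))
-- ===== Notes on version B (the rewrite author's own statement) =====
-- stated objective: idiomatic
-- what changed: B replaces A's strip/startswith/endswith branch chain by two compiled anchored regular expressions (bold then italic, with negative lookaheads for the *** / ** exclusions) applied per line, the way an experienced Python developer would write this lint fix.
-- intended difference: On contents containing a line whose stripped form is exactly '*' or '**' (an emphasis marker with no text), A converts that line to the empty heading '#### ' while B leaves it unchanged, which is the intended behaviour: a bare marker is not an emphasis-as-heading and an empty heading is wrong. — e.g. on fix_md036_emphasis_as_heading("**"): A returns "#### ", B returns "**"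
import Mathlib
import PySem

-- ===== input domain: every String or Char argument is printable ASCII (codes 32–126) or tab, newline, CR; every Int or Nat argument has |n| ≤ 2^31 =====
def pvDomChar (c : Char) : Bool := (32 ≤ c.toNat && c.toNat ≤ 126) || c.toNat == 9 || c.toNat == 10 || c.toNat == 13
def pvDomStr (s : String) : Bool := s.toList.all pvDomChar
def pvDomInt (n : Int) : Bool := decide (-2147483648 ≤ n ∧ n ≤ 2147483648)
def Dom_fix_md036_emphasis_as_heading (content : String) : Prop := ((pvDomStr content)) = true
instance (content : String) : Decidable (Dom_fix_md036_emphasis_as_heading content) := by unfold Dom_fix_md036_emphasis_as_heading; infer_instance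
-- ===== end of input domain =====

-- B rewrites the lint fix with two compiled anchored regular expressions per line
-- (idiomatic); on lines stripping to a bare '*' or '**' B intentionally keeps the
-- line where A emits an empty heading (see D_ below).

-- ===== PORT A =====
def fix_md036_emphasis_as_heading (content : String) : String :=
  let lines := PySem.Chars.splitOn content.toList ['\n']
  let result := lines.foldl (fun acc line =>
    let stripped := PySem.Chars.strip line
    if PySem.Chars.startswith stripped ['*', '*'] &&
       PySem.Chars.endswith stripped ['*', '*'] &&
       !(PySem.Chars.startswith stripped ['*', '*', '*']) then
      acc ++ ["#### ".toList ++ PySem.Chars.strip (PySem.List.slice stripped (some 2) (some (-2)))]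
    else if PySem.Chars.startswith stripped ['*'] &&
            PySem.Chars.endswith stripped ['*'] &&
            !(PySem.Chars.startswith stripped ['*', '*']) then
      acc ++ ["#### ".toList ++ PySem.Chars.strip (PySem.List.slice stripped (some 1) (some (-1)))]
    else
      acc ++ [line]) []
  String.ofList (PySem.Chars.join ['\n'] result)

-- ===== PORT B =====
-- Hand port of re.match with the anchored pattern ^\s*(k stars)(?!\*)(.*?)(k stars)\s*$
-- (k = 2 bold, k = 1 italic). Exact on Dom lines (whitespace inside a line is ' '/'\t'/'\r',
-- all matched by \s and stripped by str.strip; '.' never meets '\n' since lines are split on it):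
-- the anchored \s*…\s*$ pair consumes exactly the surrounding whitespace, so the pattern
-- matches iff the stripped line starts with k stars not followed by another star, has length
-- ≥ 2k (opening and closing runs disjoint), and ends with k stars; the lazy group is then
-- exactly the stripped line without its k outer stars on each side.
def pvReMatchStars? (k : Nat) (line : List Char) : Option (List Char) :=
  let s := PySem.Chars.strip line
  if PySem.Chars.startswith s (List.replicate k '*') &&
     !(PySem.Chars.startswith s (List.replicate (k+1) '*')) &&
     decide (2*k ≤ s.length) &&
     PySem.Chars.endswith s (List.replicate k '*') then
    some (PySem.List.slice s (some (k : Int)) (some (-(k : Int))))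
  else none

-- _fix_line: bold match, else italic match, else keep the line
def pvFixLineB (line : List Char) : List Char :=
  match (pvReMatchStars? 2 line).orElse (fun _ => pvReMatchStars? 1 line) with
  | some g => "#### ".toList ++ PySem.Chars.strip g
  | none => line

def fix_md036_emphasis_as_heading_alt (content : String) : String :=
  String.ofList (PySem.Chars.join ['\n']
    ((PySem.Chars.splitOn content.toList ['\n']).map pvFixLineB))

-- ===== PRECONDITION & SPEC =====
-- On contents containing a line whose stripped form is exactly '*' or '**' (a bare emphasis
-- marker with no text), A converts that line to the empty heading '#### ' while B leaves it
-- unchanged, which is the intended behaviour: an empty heading is wrong.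
def D_fix_md036_emphasis_as_heading (content : String) : Prop :=
  ∃ line ∈ PySem.Chars.splitOn content.toList ['\n'],
    PySem.Chars.strip line = ['*'] ∨ PySem.Chars.strip line = ['*', '*']
instance (content : String) : Decidable (D_fix_md036_emphasis_as_heading content) := by
  unfold D_fix_md036_emphasis_as_heading; infer_instance

def Spec_fix_md036_emphasis_as_heading (content : String) (out : String) : Prop :=
  ¬ D_fix_md036_emphasis_as_heading content → out = fix_md036_emphasis_as_heading_alt content
instance (content : String) (out : String) : Decidable (Spec_fix_md036_emphasis_as_heading content out) := by
  unfold Spec_fix_md036_emphasis_as_heading; infer_instance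

def pvDiffWitness_fix_md036_emphasis_as_heading : String := "**"
def pvDiffWitnessOut_fix_md036_emphasis_as_heading : String × String := ("#### ", "**")

-- ===== CLAIM (what is proved, stated in full; the proofs are below) =====
def Claim_unchanged_fix_md036_emphasis_as_heading : Prop := ∀ (content : String), Dom_fix_md036_emphasis_as_heading content → Spec_fix_md036_emphasis_as_heading content (fix_md036_emphasis_as_heading content)
def Claim_exact_fix_md036_emphasis_as_heading : Prop := ∀ (content : String), Dom_fix_md036_emphasis_as_heading content → D_fix_md036_emphasis_as_heading content → fix_md036_emphasis_as_heading content ≠ fix_md036_emphasis_as_heading_alt content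
def Claim_changed_fix_md036_emphasis_as_heading : Prop := Dom_fix_md036_emphasis_as_heading (pvDiffWitness_fix_md036_emphasis_as_heading) ∧ D_fix_md036_emphasis_as_heading (pvDiffWitness_fix_md036_emphasis_as_heading) ∧ fix_md036_emphasis_as_heading (pvDiffWitness_fix_md036_emphasis_as_heading) = pvDiffWitnessOut_fix_md036_emphasis_as_heading.1 ∧ fix_md036_emphasis_as_heading_alt (pvDiffWitness_fix_md036_emphasis_as_heading) = pvDiffWitnessOut_fix_md036_emphasis_as_heading.2 ∧ pvDiffWitnessOut_fix_md036_emphasis_as_heading.1 ≠ pvDiffWitnessOut_fix_md036_emphasis_as_heading.2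

-- ===== LEMMAS AND PROOFS =====

-- A's bold branch plus "stripped ≠ '**'" forces length ≥ 4
lemma pv_bold_len (s : List Char)
    (h2 : ['*', '*'] <+: s) (he : ['*', '*'] <:+ s)
    (h3 : ¬ (['*', '*', '*'] <+: s)) (hne : s ≠ ['*', '*']) : 4 ≤ s.length := by
  obtain ⟨t, rfl⟩ := h2
  match t with
  | [] => exact absurd rfl hne
  | [x] =>
    obtain ⟨u, hu⟩ := he
    have hlen : u.length = 1 := by
      have := congrArg List.length hu
      simp at this; omega
    match u, hlen with
    | [a], _ =>
      simp at hu
      obtain ⟨hu1, hu2⟩ := hu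
      subst hu2
      exact absurd ⟨[], by simp⟩ h3
  | x :: y :: t' => simp only [List.length_append, List.length_cons]; omega

-- A's italic branch plus "stripped ≠ '*'" forces length ≥ 2
lemma pv_ital_len (s : List Char) (h1 : ['*'] <+: s) (hne : s ≠ ['*']) : 2 ≤ s.length := by
  obtain ⟨t, rfl⟩ := h1
  match t with
  | [] => exact absurd rfl hne
  | x :: t' => simp

-- per-line agreement of A's branch chain with B's regex chain, away from bare markers
lemma pv_fix_line (line : List Char)
    (h : ¬ (PySem.Chars.strip line = ['*'] ∨ PySem.Chars.strip line = ['*', '*'])) :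
    (let stripped := PySem.Chars.strip line
     if PySem.Chars.startswith stripped ['*', '*'] &&
        PySem.Chars.endswith stripped ['*', '*'] &&
        !(PySem.Chars.startswith stripped ['*', '*', '*']) then
       "#### ".toList ++ PySem.Chars.strip (PySem.List.slice stripped (some 2) (some (-2)))
     else if PySem.Chars.startswith stripped ['*'] &&
             PySem.Chars.endswith stripped ['*'] &&
             !(PySem.Chars.startswith stripped ['*', '*']) then
       "#### ".toList ++ PySem.Chars.strip (PySem.List.slice stripped (some 1) (some (-1)))
     else line)
    = pvFixLineB line := by
  rw [not_or] at h
  obtain ⟨h1, h2⟩ := h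
  unfold pvFixLineB pvReMatchStars?
  dsimp only
  set s := PySem.Chars.strip line with hs
  have hrep1 : (List.replicate 1 '*' : List Char) = ['*'] := rfl
  have hrep2 : (List.replicate 2 '*' : List Char) = ['*', '*'] := rfl
  have hrep3 : (List.replicate 3 '*' : List Char) = ['*', '*', '*'] := rfl
  rw [hrep1, hrep2, hrep3]
  -- bold condition equivalence
  have hbold : (PySem.Chars.startswith s ['*', '*'] && PySem.Chars.endswith s ['*', '*'] &&
      !(PySem.Chars.startswith s ['*', '*', '*'])) =
      (PySem.Chars.startswith s ['*', '*'] && !(PySem.Chars.startswith s ['*', '*', '*']) &&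
      decide (2*2 ≤ s.length) && PySem.Chars.endswith s ['*', '*']) := by
    cases hb : PySem.Chars.startswith s ['*', '*'] <;>
    cases hee : PySem.Chars.endswith s ['*', '*'] <;>
    cases hc : PySem.Chars.startswith s ['*', '*', '*'] <;> simp
    have := pv_bold_len s ((PySem.Chars.startswith_iff _ _).mp hb)
      ((PySem.Chars.endswith_iff _ _).mp hee)
      (fun hp => by simp [(PySem.Chars.startswith_iff s ['*','*','*']).mpr hp] at hc) h2
    omega
  -- italic condition equivalence
  have hital : (PySem.Chars.startswith s ['*'] && PySem.Chars.endswith s ['*'] &&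
      !(PySem.Chars.startswith s ['*', '*'])) =
      (PySem.Chars.startswith s ['*'] && !(PySem.Chars.startswith s ['*', '*']) &&
      decide (2*1 ≤ s.length) && PySem.Chars.endswith s ['*']) := by
    cases hb : PySem.Chars.startswith s ['*'] <;>
    cases hee : PySem.Chars.endswith s ['*'] <;>
    cases hc : PySem.Chars.startswith s ['*', '*'] <;> simp
    have := pv_ital_len s ((PySem.Chars.startswith_iff _ _).mp hb) h1
    omega
  rw [← hbold, ← hital]
  split_ifs <;> simp_all [Option.orElse]

-- A's accumulator loop is the map of its per-line branch, on contents outside D_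
lemma pv_foldl (lines : List (List Char)) (acc : List (List Char))
    (h : ∀ l ∈ lines, ¬ (PySem.Chars.strip l = ['*'] ∨ PySem.Chars.strip l = ['*', '*'])) :
    lines.foldl (fun acc line =>
      let stripped := PySem.Chars.strip line
      if PySem.Chars.startswith stripped ['*', '*'] &&
         PySem.Chars.endswith stripped ['*', '*'] &&
         !(PySem.Chars.startswith stripped ['*', '*', '*']) then
        acc ++ ["#### ".toList ++ PySem.Chars.strip (PySem.List.slice stripped (some 2) (some (-2)))]
      else if PySem.Chars.startswith stripped ['*'] &&
              PySem.Chars.endswith stripped ['*'] &&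
              !(PySem.Chars.startswith stripped ['*', '*']) then
        acc ++ ["#### ".toList ++ PySem.Chars.strip (PySem.List.slice stripped (some 1) (some (-1)))]
      else
        acc ++ [line]) acc
    = acc ++ lines.map pvFixLineB := by
  induction lines generalizing acc with
  | nil => simp
  | cons l t ih =>
    have hl := pv_fix_line l (h l (by simp))
    simp only [List.foldl_cons, List.map_cons]
    rw [ih _ (fun x hx => h x (by simp [hx]))]
    dsimp only at hl ⊢
    rw [← hl]
    split_ifs <;> simp

-- proof-only name for A's per-line branch (no let, so hypotheses about strip rewrite everywhere)
def pvFixLineA (line : List Char) : List Char :=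
  if PySem.Chars.startswith (PySem.Chars.strip line) ['*', '*'] &&
     PySem.Chars.endswith (PySem.Chars.strip line) ['*', '*'] &&
     !(PySem.Chars.startswith (PySem.Chars.strip line) ['*', '*', '*']) then
    "#### ".toList ++ PySem.Chars.strip (PySem.List.slice (PySem.Chars.strip line) (some 2) (some (-2)))
  else if PySem.Chars.startswith (PySem.Chars.strip line) ['*'] &&
          PySem.Chars.endswith (PySem.Chars.strip line) ['*'] &&
          !(PySem.Chars.startswith (PySem.Chars.strip line) ['*', '*']) then
    "#### ".toList ++ PySem.Chars.strip (PySem.List.slice (PySem.Chars.strip line) (some 1) (some (-1)))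
  else line

-- A's loop, written as a map of that branch (no side condition)
lemma pv_foldl_all (lines : List (List Char)) (acc : List (List Char)) :
    lines.foldl (fun acc line =>
      let stripped := PySem.Chars.strip line
      if PySem.Chars.startswith stripped ['*', '*'] &&
         PySem.Chars.endswith stripped ['*', '*'] &&
         !(PySem.Chars.startswith stripped ['*', '*', '*']) then
        acc ++ ["#### ".toList ++ PySem.Chars.strip (PySem.List.slice stripped (some 2) (some (-2)))]
      else if PySem.Chars.startswith stripped ['*'] &&
              PySem.Chars.endswith stripped ['*'] &&
              !(PySem.Chars.startswith stripped ['*', '*']) then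
        acc ++ ["#### ".toList ++ PySem.Chars.strip (PySem.List.slice stripped (some 1) (some (-1)))]
      else
        acc ++ [line]) acc
    = acc ++ lines.map pvFixLineA := by
  induction lines generalizing acc with
  | nil => simp
  | cons l t ih =>
    simp only [List.foldl_cons, List.map_cons]
    rw [ih]
    have hstep : (let stripped := PySem.Chars.strip l
      if PySem.Chars.startswith stripped ['*', '*'] &&
         PySem.Chars.endswith stripped ['*', '*'] &&
         !(PySem.Chars.startswith stripped ['*', '*', '*']) then
        acc ++ ["#### ".toList ++ PySem.Chars.strip (PySem.List.slice stripped (some 2) (some (-2)))]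
      else if PySem.Chars.startswith stripped ['*'] &&
              PySem.Chars.endswith stripped ['*'] &&
              !(PySem.Chars.startswith stripped ['*', '*']) then
        acc ++ ["#### ".toList ++ PySem.Chars.strip (PySem.List.slice stripped (some 1) (some (-1)))]
      else
        acc ++ [l]) = acc ++ [pvFixLineA l] := by
      unfold pvFixLineA
      dsimp only
      split_ifs <;> rfl
    rw [hstep]
    simp

-- counting '#' through the '\n'-join: the separator contributes nothing
lemma pv_count_join (ls : List (List Char)) :
    (PySem.Chars.join ['\n'] ls).count '#' = (ls.map (fun l => l.count '#')).sum := by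
  induction ls with
  | nil => simp [PySem.Chars.join_nil]
  | cons a t ih =>
    cases t with
    | nil => simp [PySem.Chars.join_singleton]
    | cons b t' =>
      rw [PySem.Chars.join_cons_cons, List.count_append, List.count_append, ih]
      simp

-- a non-whitespace character of a line survives str.strip
lemma pv_mem_strip (c : Char) (l : List Char) (hc : PySem.Chars.isspace c = false)
    (h : c ∈ l) : c ∈ PySem.Chars.strip l := by
  unfold PySem.Chars.strip PySem.Chars.rstrip PySem.Chars.lstrip
  have h1 : c ∈ List.dropWhile PySem.Chars.isspace l := by
    rcases (List.mem_append.mp (by rw [List.takeWhile_append_dropWhile]; exact h :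
        c ∈ List.takeWhile PySem.Chars.isspace l ++ List.dropWhile PySem.Chars.isspace l)) with h' | h'
    · exact absurd (List.mem_takeWhile_imp h') (by simp [hc])
    · exact h'
  set m := List.dropWhile PySem.Chars.isspace l with hm
  have h2 : c ∈ m.reverse := List.mem_reverse.mpr h1
  rcases (List.mem_append.mp (by rw [List.takeWhile_append_dropWhile]; exact h2 :
      c ∈ List.takeWhile PySem.Chars.isspace m.reverse ++ List.dropWhile PySem.Chars.isspace m.reverse)) with h' | h'
  · exact absurd (List.mem_takeWhile_imp h') (by simp [hc])
  · exact List.mem_reverse.mpr h'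

-- a line stripping to a bare marker contains no '#'
lemma pv_bad_count (l : List Char)
    (hbad : PySem.Chars.strip l = ['*'] ∨ PySem.Chars.strip l = ['*', '*']) :
    l.count '#' = 0 := by
  rw [List.count_eq_zero]
  intro h
  have := pv_mem_strip '#' l (by decide) h
  rcases hbad with hb | hb <;> rw [hb] at this <;> simp at this

-- on a bare-marker line, A's branch emits the empty heading …
lemma pv_badA (l : List Char)
    (hbad : PySem.Chars.strip l = ['*'] ∨ PySem.Chars.strip l = ['*', '*']) :
    pvFixLineA l = "#### ".toList := by
  unfold pvFixLineA
  rcases hbad with hb | hb <;> rw [hb] <;> rfl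

-- … while B's regexes fail to match and the line is kept
lemma pv_badB (l : List Char)
    (hbad : PySem.Chars.strip l = ['*'] ∨ PySem.Chars.strip l = ['*', '*']) :
    pvFixLineB l = l := by
  unfold pvFixLineB pvReMatchStars?
  dsimp only
  rcases hbad with hb | hb <;> rw [hb] <;> rfl

-- away from bare markers the two branches agree (restatement of pv_fix_line)
lemma pv_fix_lineA (line : List Char)
    (h : ¬ (PySem.Chars.strip line = ['*'] ∨ PySem.Chars.strip line = ['*', '*'])) :
    pvFixLineA line = pvFixLineB line := by
  have := pv_fix_line line h
  unfold pvFixLineA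
  exact this

-- ===== VERDICT (by name: the statements are the Claim_ definitions above) =====
theorem fix_md036_emphasis_as_heading_spec : Claim_unchanged_fix_md036_emphasis_as_heading := by
  intro content _ hD
  unfold fix_md036_emphasis_as_heading fix_md036_emphasis_as_heading_alt
  have h : ∀ l ∈ PySem.Chars.splitOn content.toList ['\n'],
      ¬ (PySem.Chars.strip l = ['*'] ∨ PySem.Chars.strip l = ['*', '*']) := by
    intro l hl hbad
    exact hD ⟨l, hl, hbad⟩
  simp only [pv_foldl _ _ h]
  simp

theorem fix_md036_emphasis_as_heading_changed : Claim_changed_fix_md036_emphasis_as_heading := by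
  unfold Claim_changed_fix_md036_emphasis_as_heading; decide

theorem fix_md036_emphasis_as_heading_tight : Claim_exact_fix_md036_emphasis_as_heading := by
  intro content _ hD hEq
  obtain ⟨l, hl, hbad⟩ := hD
  unfold fix_md036_emphasis_as_heading fix_md036_emphasis_as_heading_alt at hEq
  simp only [pv_foldl_all, List.nil_append] at hEq
  have hx : PySem.Chars.join ['\n'] ((PySem.Chars.splitOn content.toList ['\n']).map pvFixLineA)
      = PySem.Chars.join ['\n'] ((PySem.Chars.splitOn content.toList ['\n']).map pvFixLineB) := by
    have := congrArg String.toList hEq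
    simpa using this
  have hc := congrArg (List.count '#') hx
  rw [pv_count_join, pv_count_join, List.map_map, List.map_map] at hc
  have hlt : ((PySem.Chars.splitOn content.toList ['\n']).map
        (fun l => (pvFixLineB l).count '#')).sum <
      ((PySem.Chars.splitOn content.toList ['\n']).map
        (fun l => (pvFixLineA l).count '#')).sum := by
    apply List.sum_lt_sum
    · intro l' hl'
      by_cases hb : PySem.Chars.strip l' = ['*'] ∨ PySem.Chars.strip l' = ['*', '*']
      · rw [pv_badA l' hb, pv_badB l' hb, pv_bad_count l' hb]
        simp
      · rw [pv_fix_lineA l' hb]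
    · exact ⟨l, hl, by rw [pv_badA l hbad, pv_badB l hbad, pv_bad_count l hbad]; decide⟩
  simp only [Function.comp_def] at hc
  omega
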